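-- pv_equiv track=rewrite | github.com/PArguelles/thesis-scripts | Clustering/UtilitiesCommon.py | generateMeasureCombinations
-- ===== SOURCE A (Python) =====
-- def generateMeasureCombinations(measures):
--     measures_copy = measures
--     visited = []
--     combinations = set()
--
--     x = 0
--     y = 0
--     while x < len(measures):
--         while y < len(measures_copy):
--             if measures_copy[y] not in visited:
--                 line = measures[x]+' '+measures_copy[y]
--                 combinations.add(line)
--             y += 1
--         visited.append(measures[x])
--         x += 1
--         y = 0
--
--     combinations = list(combinations)
--     return combinations
-- ===== SOURCE B (Python) =====
-- def generateMeasureCombinations(measures):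
--     unique = []
--     for m in measures:
--         if m not in unique:
--             unique.append(m)
--     combinations = set()
--     rest = unique
--     while rest:
--         first = rest[0]
--         for m in rest:
--             combinations.add(first + ' ' + m)
--         rest = rest[1:]
--     return list(combinations)
-- ===== Notes on version B (the rewrite author's own statement) =====
-- stated objective: faster
-- what changed: B deduplicates the measures once into first-appearance order and then enumerates each upper-triangular pair of distinct values exactly once over shrinking suffixes, instead of A's n*n index loop that rescans the growing visited list for every element.
import Mathlib
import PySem

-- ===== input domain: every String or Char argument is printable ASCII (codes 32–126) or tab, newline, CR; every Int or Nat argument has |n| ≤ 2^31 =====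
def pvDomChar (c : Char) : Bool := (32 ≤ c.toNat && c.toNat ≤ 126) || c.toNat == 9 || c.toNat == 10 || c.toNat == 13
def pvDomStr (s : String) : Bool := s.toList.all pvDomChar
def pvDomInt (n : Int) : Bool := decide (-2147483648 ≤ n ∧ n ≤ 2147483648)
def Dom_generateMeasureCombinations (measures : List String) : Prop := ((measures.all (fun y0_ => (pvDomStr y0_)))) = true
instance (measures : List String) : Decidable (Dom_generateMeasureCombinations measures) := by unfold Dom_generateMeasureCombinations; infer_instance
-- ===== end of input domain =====

-- B deduplicates the measures once and enumerates each upper-triangular pair of the distinct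
-- values exactly once, replacing A's rescans of the growing `visited` list inside n*n iterations;
-- the returned set (Python `list(set(...))`) is compared as a set.

-- ===== PORT A =====
-- A's two while-loops with counters x, y become folds over the index ranges, with
-- `measures[x]` / `measures_copy[y]` read via PySem.List.pyGetD (the indices stay in range).
def generateMeasureCombinations (measures : List String) : List String :=
  let measures_copy := measures
  let st := (PySem.List.pyRange 0 (measures.length : Int)).foldl
    (fun (st : List String × PySem.Set String) x =>
      let visited := st.1
      let combinations := (PySem.List.pyRange 0 (measures_copy.length : Int)).foldl
        (fun c y =>
          if (PySem.List.pyGetD measures_copy y "") ∉ visited then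
            PySem.Set.add c (PySem.List.pyGetD measures x "" ++ " " ++ PySem.List.pyGetD measures_copy y "")
          else c)
        st.2
      (visited ++ [PySem.List.pyGetD measures x ""], combinations))
    ([], PySem.Set.empty)
  st.2

-- ===== PORT B =====
-- `while rest: first = rest[0]; for m in rest: combinations.add(first+' '+m); rest = rest[1:]`
def altLoop : PySem.Set String → List String → PySem.Set String
  | c, [] => c
  | c, first :: rest =>
      altLoop ((first :: rest).foldl (fun c m => PySem.Set.add c (first ++ " " ++ m)) c) rest

def generateMeasureCombinations_alt (measures : List String) : List String :=
  let unique := measures.foldl (fun u m => if m ∉ u then u ++ [m] else u) []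
  altLoop PySem.Set.empty unique

-- ===== PRECONDITION & SPEC =====
def Spec_generateMeasureCombinations (measures : List String) (out : List String) : Prop := out = generateMeasureCombinations_alt measures
instance (measures : List String) (out : List String) : Decidable (Spec_generateMeasureCombinations measures out) := by unfold Spec_generateMeasureCombinations; infer_instance

-- ===== CLAIM (what is proved, stated in full; the proofs are below) =====
def Claim_equal_generateMeasureCombinations : Prop := ∀ (measures : List String), Dom_generateMeasureCombinations measures → Spec_generateMeasureCombinations measures (generateMeasureCombinations measures)

-- ===== LEMMAS AND PROOFS =====

-- the pair string both programs build
def pairStr (v m : String) : String := v ++ " " ++ m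

-- A's inner while-loop, re-expressed as a fold over the elements
def innerA (M visited : List String) (v : String) (c : PySem.Set String) : PySem.Set String :=
  M.foldl (fun c m => if m ∉ visited then PySem.Set.add c (pairStr v m) else c) c

-- A's outer loop step, over the elements
def stepA (M : List String) (st : List String × PySem.Set String) (v : String) :
    List String × PySem.Set String :=
  (st.1 ++ [v], innerA M st.1 v st.2)

lemma portA_eq (measures : List String) :
    generateMeasureCombinations measures =
      (measures.foldl (stepA measures) ([], [])).2 := by
  have hinner : ∀ (visited : List String) (v : String) (c : PySem.Set String),
      List.foldl (fun c y =>
          if (PySem.List.pyGetD measures y "") ∉ visited then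
            PySem.Set.add c (v ++ " " ++ PySem.List.pyGetD measures y "")
          else c) c (PySem.List.pyRange 0 (measures.length : Int))
        = innerA measures visited v c := fun visited v c =>
    PySem.List.foldl_pyRange_zero_pyGetD' measures ""
      (fun c m => if m ∉ visited then PySem.Set.add c (pairStr v m) else c) c
  simp only [generateMeasureCombinations, hinner]
  exact congrArg Prod.snd
    (PySem.List.foldl_pyRange_zero_pyGetD' measures "" (stepA measures) ([], PySem.Set.empty))

lemma pairStr_inj (v : String) : Function.Injective (pairStr v) := by
  intro a b h
  have h2 := congrArg String.toList h
  simp only [pairStr, String.toList_append] at h2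
  exact String.toList_inj.mp (List.append_cancel_left h2)

lemma dedup_fold (measures : List String) :
    measures.foldl (fun u m => if m ∉ u then u ++ [m] else u) [] =
      PySem.Set.ofList measures := by
  rw [PySem.Set.ofList_eq_foldl]
  have h : (fun (u : List String) m => if m ∉ u then u ++ [m] else u) = PySem.Set.add := by
    funext u m
    rw [PySem.Set.add_eq_ite]
    by_cases h : m ∈ u <;> simp [h]
  rw [h]

lemma discard_filter (s : PySem.Set String) (q : String → Bool) (x : String) :
    PySem.Set.discard (s.filter q) x = (PySem.Set.discard s x).filter q := by
  simp [PySem.Set.discard, List.filter_filter, Bool.and_comm]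

lemma ofList_filter (q : String → Bool) (l : List String) :
    PySem.Set.ofList (l.filter q) = (PySem.Set.ofList l).filter q := by
  induction l with
  | nil => rfl
  | cons x l ih =>
    by_cases hq : q x
    · rw [List.filter_cons_of_pos hq, PySem.Set.ofList_cons, PySem.Set.ofList_cons,
        List.filter_cons_of_pos hq, ih, discard_filter]
    · rw [List.filter_cons_of_neg (by simpa using hq), PySem.Set.ofList_cons,
        List.filter_cons_of_neg (by simpa using hq), ih, PySem.Set.discard, List.filter_filter]
      refine List.filter_congr ?_
      intro a _
      by_cases ha : q a
      · have hax : a ≠ x := fun h => by rw [h] at ha; exact hq ha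
        simp [ha, hax]
      · simp [ha]

lemma ofList_map_inj (g : String → String) (hg : Function.Injective g) (l : List String) :
    PySem.Set.ofList (l.map g) = (PySem.Set.ofList l).map g := by
  induction l with
  | nil => rfl
  | cons x l ih =>
    rw [List.map_cons, PySem.Set.ofList_cons, PySem.Set.ofList_cons, List.map_cons, ih,
      PySem.Set.discard, PySem.Set.discard, List.filter_map]
    refine congrArg (g x :: List.map g ·) (List.filter_congr ?_)
    intro a _
    simp [Function.comp, hg.eq_iff]

lemma update_ofList (s : PySem.Set String) (l : List String) :
    s.update l = s.update (PySem.Set.ofList l) := by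
  rw [PySem.Set.update_eq_append_filter, PySem.Set.update_eq_append_filter,
    PySem.Set.ofList_ofList]

lemma innerA_eq_update (M visited : List String) (v : String) (c : PySem.Set String) :
    innerA M visited v c =
      c.update ((M.filter (fun m => !decide (m ∈ visited))).map (pairStr v)) := by
  rw [PySem.Set.update_map_eq_foldl_add, List.foldl_filter]
  unfold innerA
  have h : (fun (c : PySem.Set String) m => if m ∉ visited then PySem.Set.add c (pairStr v m) else c)
      = (fun (x : PySem.Set String) y =>
          if (!decide (y ∈ visited)) = true then x.add (pairStr v y) else x) := by
    funext c m
    by_cases h : m ∈ visited <;> simp [h]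
  rw [h]

lemma innerA_id (L visited : List String) (v : String) (c : PySem.Set String)
    (h : ∀ m ∈ L, m ∉ visited → pairStr v m ∈ c) :
    L.foldl (fun c m => if m ∉ visited then PySem.Set.add c (pairStr v m) else c) c = c := by
  induction L generalizing c with
  | nil => rfl
  | cons m L ih =>
    simp only [List.foldl_cons]
    by_cases hm : m ∈ visited
    · rw [if_neg (by simpa using hm)]
      exact ih c fun a ha => h a (List.mem_cons_of_mem _ ha)
    · rw [if_pos hm, PySem.Set.add_of_mem (h m List.mem_cons_self hm)]
      exact ih c fun a ha => h a (List.mem_cons_of_mem _ ha)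

lemma altLoop_cons (c : PySem.Set String) (x : String) (rest : List String) :
    altLoop c (x :: rest) = altLoop (c.update ((x :: rest).map (pairStr x))) rest := by
  rw [altLoop, PySem.Set.update_map_eq_foldl_add]
  rfl

lemma main_loop (M : List String) (ms p : List String) (c : PySem.Set String)
    (hM : M = p ++ ms)
    (hinv : ∀ x ∈ p, ∀ m ∈ M, m ∉ p → pairStr x m ∈ c) :
    (ms.foldl (stepA M) (p, c)).2 =
      altLoop c (PySem.Set.ofList (ms.filter (fun m => !decide (m ∈ p)))) := by
  induction ms generalizing p c with
  | nil => rfl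
  | cons x ms ih =>
    simp only [List.foldl_cons]
    have hstep : stepA M (p, c) x = (p ++ [x], innerA M p x c) := rfl
    rw [hstep]
    by_cases hx : x ∈ p
    · -- duplicate pass: the inner loop adds nothing new
      have hid : innerA M p x c = c :=
        innerA_id M p x c (fun m hm hmp => hinv x hx m hm hmp)
      have hpred : (fun m => !decide (m ∈ p ++ [x])) = (fun m => !decide (m ∈ p)) := by
        funext a
        by_cases h : a = x
        · subst h; simp [List.mem_append, hx]
        · simp [List.mem_append, h]
      have hinv' : ∀ x' ∈ p ++ [x], ∀ m ∈ M, m ∉ p ++ [x] → pairStr x' m ∈ c := by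
        intro x' hx' m hm hmp
        have hx'p : x' ∈ p := by
          rcases List.mem_append.mp hx' with h | h
          · exact h
          · have hx'x : x' = x := by simpa using h
            exact hx'x ▸ hx
        exact hinv x' hx'p m hm (fun h => hmp (List.mem_append_left _ h))
      rw [hid, ih (p ++ [x]) c (by rw [hM, List.append_assoc]; rfl) hinv', hpred,
        List.filter_cons_of_neg (by simp [hx])]
    · -- first occurrence of x
      have hPfilter : M.filter (fun m => !decide (m ∈ p)) =
          x :: ms.filter (fun m => !decide (m ∈ p)) := by
        rw [hM, List.filter_append, List.filter_eq_nil_iff.mpr (by intro a ha; simp [ha]),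
          List.nil_append, List.filter_cons_of_pos (by simp [hx])]
      have hD : PySem.Set.ofList (M.filter (fun m => !decide (m ∈ p))) =
          x :: PySem.Set.discard (PySem.Set.ofList (ms.filter (fun m => !decide (m ∈ p)))) x := by
        rw [hPfilter, PySem.Set.ofList_cons]
      -- the new combinations of this pass, as an update
      have hc' : innerA M p x c =
          c.update ((M.filter (fun m => !decide (m ∈ p))).map (pairStr x)) :=
        innerA_eq_update M p x c
      have hinv' : ∀ x' ∈ p ++ [x], ∀ m ∈ M, m ∉ p ++ [x] →
          pairStr x' m ∈ innerA M p x c := by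
        intro x' hx' m hm hmp
        rw [hc', PySem.Set.mem_update]
        have hmP : m ∉ p := fun h => hmp (List.mem_append_left _ h)
        rcases List.mem_append.mp hx' with h | h
        · exact Or.inl (hinv x' h m hm hmP)
        · refine Or.inr ?_
          have hx'x : x' = x := by simpa using h
          subst hx'x
          exact List.mem_map_of_mem (List.mem_filter.mpr ⟨hm, by simpa using hmP⟩)
      have hpred : ms.filter (fun m => !decide (m ∈ p ++ [x])) =
          (ms.filter (fun m => !decide (m ∈ p))).filter (fun a => !(a == x)) := by
        rw [List.filter_filter]
        refine List.filter_congr ?_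
        intro a _
        by_cases h : a = x
        · subst h; simp
        · by_cases hap : a ∈ p <;> simp [List.mem_append, h, hap]
      have hrw : c.update ((M.filter (fun m => !decide (m ∈ p))).map (pairStr x)) =
          c.update (((x :: PySem.Set.discard
            (PySem.Set.ofList (ms.filter (fun m => !decide (m ∈ p)))) x)).map (pairStr x)) := by
        rw [update_ofList, ofList_map_inj _ (pairStr_inj x), hD]
      rw [ih (p ++ [x]) (innerA M p x c) (by rw [hM, List.append_assoc]; rfl) hinv',
        List.filter_cons_of_pos (by simp [hx]), PySem.Set.ofList_cons, altLoop_cons,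
        hpred, ofList_filter, hc', hrw]
      rfl

-- ===== VERDICT (by name: the statement is the Claim_ definition above) =====
theorem generateMeasureCombinations_spec : Claim_equal_generateMeasureCombinations := by
  intro measures _
  unfold Spec_generateMeasureCombinations
  rw [portA_eq,
    main_loop measures measures [] [] (by simp) (by simp),
    List.filter_eq_self.mpr (by simp)]
  simp only [generateMeasureCombinations_alt]
  rw [dedup_fold]
  rfl
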